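-- pv_equiv track=rewrite | github.com/sgraaf/gpx | src/gpx/convert.py | _extract_nested_coords
-- ===== SOURCE A (Python) =====
-- def _extract_nested_coords(coords_part: str) -> list[str]:
--     """Extract coordinate groups from nested parentheses."""
--     inner = coords_part.strip()[1:-1].strip()
--     groups = []
--     depth = 0
--     current = []
--
--     for char in inner:
--         if char == "(":
--             depth += 1
--             if depth > 1:
--                 current.append(char)
--         elif char == ")":
--             depth -= 1
--             if depth >= 1:
--                 current.append(char)
--             if depth == 0 and current:
--                 groups.append("".join(current).strip())
--                 current = []
--         elif depth >= 1:
--             current.append(char)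
--
--     # Handle case where there's no nested parens (e.g., simple linestring)
--     if not groups and inner:
--         groups = [inner]
--
--     return groups
-- ===== SOURCE B (Python) =====
-- def _extract_nested_coords(coords_part: str) -> list[str]:
--     """Extract coordinate groups from nested parentheses."""
--     inner = coords_part.strip()[1:-1].strip()
--     groups = []
--     depth = 0
--     start = 0
--     for i, ch in enumerate(inner):
--         if ch == "(":
--             depth += 1
--             if depth == 1:
--                 start = i + 1
--         elif ch == ")":
--             depth -= 1
--             if depth == 0:
--                 raw = inner[start:i]
--                 if raw:
--                     groups.append(raw.strip())
--     if not groups and inner: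
--         groups = [inner]
--     return groups
-- ===== Notes on version B (the rewrite author's own statement) =====
-- stated objective: alternative
-- what changed: B replaces A's accumulated character buffer with slice boundaries: it records the index just after each opening paren that raises depth to 1 and, at the closing paren that returns depth to 0, emits the stripped raw slice of inner between those boundaries, so no per-character buffer is maintained.
import Mathlib
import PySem

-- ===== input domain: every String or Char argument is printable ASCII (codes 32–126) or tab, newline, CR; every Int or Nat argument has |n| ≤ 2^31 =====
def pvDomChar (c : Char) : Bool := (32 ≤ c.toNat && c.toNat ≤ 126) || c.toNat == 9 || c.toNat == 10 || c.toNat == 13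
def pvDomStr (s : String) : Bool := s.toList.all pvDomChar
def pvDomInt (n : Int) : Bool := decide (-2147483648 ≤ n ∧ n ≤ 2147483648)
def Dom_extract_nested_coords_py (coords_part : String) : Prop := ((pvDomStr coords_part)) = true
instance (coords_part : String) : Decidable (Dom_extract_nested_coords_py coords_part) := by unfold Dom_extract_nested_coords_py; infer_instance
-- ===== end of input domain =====

-- B tracks slice boundaries (start index) instead of A's growing character buffer; same O(n) cost (objective: alternative).

-- ===== PORT A =====
-- the for-loop of A: state (groups, depth, current buffer)
def pvGoA : List Char → List String → Int → List Char → List String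
  | [], groups, _, _ => groups
  | c :: rest, groups, depth, current =>
    if c = '(' then
      pvGoA rest groups (depth + 1) (if 1 < depth + 1 then current ++ [c] else current)
    else if c = ')' then
      let d := depth - 1
      let cur := if 1 ≤ d then current ++ [c] else current
      if d = 0 ∧ cur ≠ [] then pvGoA rest (groups ++ [String.ofList (PySem.Chars.strip cur)]) d []
      else pvGoA rest groups d cur
    else if 1 ≤ depth then pvGoA rest groups depth (current ++ [c])
    else pvGoA rest groups depth current

def extract_nested_coords_py (coords_part : String) : List String :=
  let inner := PySem.Chars.strip (PySem.List.slice (PySem.Chars.strip coords_part.toList) (some 1) (some (-1)))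
  let groups := pvGoA inner [] 0 []
  if groups = [] ∧ inner ≠ [] then [String.ofList inner] else groups

-- ===== PORT B =====
-- the for-loop of B: state (index i, groups, depth, start boundary); slices inner on emit
def pvGoB (inner : List Char) : List Char → Nat → List String → Int → Nat → List String
  | [], _, groups, _, _ => groups
  | c :: rest, i, groups, depth, start =>
    if c = '(' then
      pvGoB inner rest (i + 1) groups (depth + 1) (if depth + 1 = 1 then i + 1 else start)
    else if c = ')' then
      let d := depth - 1
      if d = 0 then
        let raw := PySem.List.slice inner (some (start : Int)) (some (i : Int))
        if raw ≠ [] then pvGoB inner rest (i + 1) (groups ++ [String.ofList (PySem.Chars.strip raw)]) d start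
        else pvGoB inner rest (i + 1) groups d start
      else pvGoB inner rest (i + 1) groups d start
    else pvGoB inner rest (i + 1) groups depth start

def extract_nested_coords_py_alt (coords_part : String) : List String :=
  let inner := PySem.Chars.strip (PySem.List.slice (PySem.Chars.strip coords_part.toList) (some 1) (some (-1)))
  let groups := pvGoB inner inner 0 [] 0 0
  if groups = [] ∧ inner ≠ [] then [String.ofList inner] else groups

-- ===== PRECONDITION & SPEC =====
def Spec_extract_nested_coords_py (coords_part : String) (out : List String) : Prop := out = extract_nested_coords_py_alt coords_part
instance (coords_part : String) (out : List String) : Decidable (Spec_extract_nested_coords_py coords_part out) := by unfold Spec_extract_nested_coords_py; infer_instance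

-- ===== CLAIM (what is proved, stated in full; the proofs are below) =====
def Claim_equal_extract_nested_coords_py : Prop := ∀ (coords_part : String), Dom_extract_nested_coords_py coords_part → Spec_extract_nested_coords_py coords_part (extract_nested_coords_py coords_part)

-- ===== LEMMAS AND PROOFS =====

lemma pv_take_snoc (inner : List Char) (start i : Nat) (c : Char) (rest : List Char)
    (hdrop : inner.drop i = c :: rest) (hsi : start ≤ i) :
    (inner.drop start).take (i + 1 - start) = (inner.drop start).take (i - start) ++ [c] := by
  have hi : i < inner.length := by
    have := congrArg List.length hdrop
    simp [List.length_drop] at this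
    omega
  have h0 : inner[i]? = some c := by
    have h : (List.drop i inner)[0]? = some c := by rw [hdrop]; rfl
    rw [List.getElem?_drop] at h
    simpa using h
  have hget : (inner.drop start)[i - start]? = some c := by
    rw [List.getElem?_drop, show start + (i - start) = i from by omega]
    exact h0
  have h1 : i + 1 - start = (i - start) + 1 := by omega
  rw [h1, List.take_succ, hget]
  simp

lemma pv_loop_eq (inner : List Char) :
    ∀ (rest : List Char) (i start : Nat) (groups : List String) (depth : Int) (current : List Char),
      inner.drop i = rest → start ≤ i →
      ((1 ≤ depth ∧ current = (inner.drop start).take (i - start)) ∨ (depth ≤ 0 ∧ current = [])) →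
      pvGoA rest groups depth current = pvGoB inner rest i groups depth start := by
  intro rest
  induction rest with
  | nil => intro i start groups depth current _ _ _; simp [pvGoA, pvGoB]
  | cons c rest ih =>
    intro i start groups depth current hdrop hsi hinv
    have hdrop' : inner.drop (i + 1) = rest := by
      rw [← List.tail_drop, hdrop]
      rfl
    have hsnoc : ∀ cur, cur = (inner.drop start).take (i - start) →
        cur ++ [c] = (inner.drop start).take (i + 1 - start) := by
      intro cur hcur
      rw [hcur, pv_take_snoc inner start i c rest hdrop hsi]
    by_cases hc : c = '('
    · subst hc
      simp only [pvGoA, pvGoB]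
      rcases hinv with ⟨hd, hcur⟩ | ⟨hd, hcur⟩
      · rw [if_pos (by omega : (1:Int) < depth + 1), if_neg (by omega : ¬ depth + 1 = 1)]
        exact ih (i + 1) start groups (depth + 1) _ hdrop' (by omega)
          (Or.inl ⟨by omega, hsnoc current hcur⟩)
      · rw [if_neg (by omega : ¬ (1:Int) < depth + 1)]
        by_cases hd1 : depth + 1 = 1
        · rw [if_pos hd1, hd1]
          exact ih (i + 1) (i + 1) groups 1 current hdrop' (by omega)
            (Or.inl ⟨le_refl 1, by simp [hcur]⟩)
        · rw [if_neg hd1]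
          exact ih (i + 1) start groups (depth + 1) current hdrop' (by omega)
            (Or.inr ⟨by omega, hcur⟩)
    · by_cases hc2 : c = ')'
      · subst hc2
        simp only [pvGoA, pvGoB, if_neg hc]
        rcases hinv with ⟨hd, hcur⟩ | ⟨hd, hcur⟩
        · by_cases hd1 : depth = 1
          · subst hd1
            rw [if_neg (by omega : ¬ (1:Int) ≤ 1 - 1)]
            rw [if_pos (by omega : (1:Int) - 1 = 0)]
            have hraw : PySem.List.slice inner (some (start : Int)) (some (i : Int)) =
                (inner.drop start).take (i - start) := PySem.List.slice_natCast inner start i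
            rw [hraw, ← hcur]
            by_cases hne : current = []
            · rw [if_neg (by simp [hne] : ¬ ((1:Int) - 1 = 0 ∧ current ≠ [])),
                if_neg (by simp [hne] : ¬ current ≠ [])]
              exact ih (i + 1) start groups (1 - 1) current hdrop' (by omega)
                (Or.inr ⟨by omega, hne⟩)
            · rw [if_pos (⟨by omega, hne⟩ : ((1:Int) - 1 = 0 ∧ current ≠ [])), if_pos hne]
              exact ih (i + 1) start _ (1 - 1) [] hdrop' (by omega) (Or.inr ⟨by omega, rfl⟩)
          · rw [if_pos (by omega : (1:Int) ≤ depth - 1),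
              if_neg (by omega : ¬ ((depth:Int) - 1 = 0 ∧ current ++ [')'] ≠ [])),
              if_neg (by omega : ¬ (depth:Int) - 1 = 0)]
            exact ih (i + 1) start groups (depth - 1) _ hdrop' (by omega)
              (Or.inl ⟨by omega, hsnoc current hcur⟩)
        · rw [if_neg (by omega : ¬ (1:Int) ≤ depth - 1),
            if_neg (by omega : ¬ ((depth:Int) - 1 = 0 ∧ current ≠ [])),
            if_neg (by omega : ¬ (depth:Int) - 1 = 0)]
          exact ih (i + 1) start groups (depth - 1) current hdrop' (by omega)
            (Or.inr ⟨by omega, hcur⟩)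
      · simp only [pvGoA, pvGoB, if_neg hc, if_neg hc2]
        rcases hinv with ⟨hd, hcur⟩ | ⟨hd, hcur⟩
        · rw [if_pos hd]
          exact ih (i + 1) start groups depth _ hdrop' (by omega)
            (Or.inl ⟨hd, hsnoc current hcur⟩)
        · rw [if_neg (by omega : ¬ (1:Int) ≤ depth)]
          exact ih (i + 1) start groups depth current hdrop' (by omega)
            (Or.inr ⟨hd, hcur⟩)

-- ===== VERDICT (by name: the statement is the Claim_ definition above) =====
theorem extract_nested_coords_py_spec : Claim_equal_extract_nested_coords_py := by
  intro coords_part _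
  unfold Spec_extract_nested_coords_py extract_nested_coords_py extract_nested_coords_py_alt
  dsimp only
  rw [pv_loop_eq _ _ 0 0 [] 0 [] List.drop_zero (le_refl 0) (Or.inr ⟨le_refl 0, rfl⟩)]
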